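-- pv_equiv track=rewrite | github.com/therthold/- | tree/火星车勘探 (完全二叉树).py | check
-- ===== SOURCE A (Python) =====
-- def check(codes):
--     root = codes[0]
--     if root == '#':
--         return 'F'
--     idx = 1
--     cur = 2
--     while idx < len(codes) and cur > 0:
--         if codes[idx] == '#':
--             cur -= 1
--         else:
--             cur += 1
--         idx += 1
--     if cur == 0 and idx == len(codes):
--         return 'T'
--     return 'F'
-- ===== SOURCE B (Python) =====
-- def check(codes):
--     root = codes[0]
--     if root == '#':
--         return 'F'
--     stack = []
--     for t in codes:
--         stack.append(t)
--         while len(stack) >= 3 and stack[-1] == '#' and stack[-2] == '#' and stack[-3] != '#':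
--             del stack[-3:]
--             stack.append('#')
--     return 'T' if stack == ['#'] else 'F'
-- ===== Notes on version B (the rewrite author's own statement) =====
-- stated objective: alternative
-- what changed: Replaced the early-stopping open-slot balance counter with an iterative stack-reduction parser that pushes each token and repeatedly collapses the top pattern node-'#'-'#' into '#', accepting iff the stack ends as ['#'].
import Mathlib
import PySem

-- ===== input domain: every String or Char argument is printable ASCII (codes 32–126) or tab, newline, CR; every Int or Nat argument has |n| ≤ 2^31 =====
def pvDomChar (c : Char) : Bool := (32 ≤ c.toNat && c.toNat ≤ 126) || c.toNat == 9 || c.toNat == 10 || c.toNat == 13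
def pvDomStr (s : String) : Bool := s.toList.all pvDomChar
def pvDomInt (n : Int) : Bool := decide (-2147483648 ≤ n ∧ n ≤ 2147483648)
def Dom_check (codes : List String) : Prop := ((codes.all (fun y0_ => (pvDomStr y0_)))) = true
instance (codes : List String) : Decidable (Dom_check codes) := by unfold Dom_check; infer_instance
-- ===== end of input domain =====

-- B replaces A's early-stopping balance counter by an iterative stack-reduction parser
-- (collapse "node # #" → "#"); an alternative algorithm of the same cost, not claimed faster.

-- ===== PORT A =====
-- A's while loop: walks the remaining tokens, stopping when cur ≤ 0 or the list ends;
-- returns (remaining tokens, cur) — 'remaining = []' is Python's 'idx == len(codes)'.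
def checkLoop (l : List String) (cur : Int) : List String × Int :=
  match l with
  | [] => ([], cur)
  | c :: rest =>
    if 0 < cur then
      checkLoop rest (if c = "#" then cur - 1 else cur + 1)
    else (c :: rest, cur)

def check (codes : List String) : String :=
  match PySem.List.pyGet? codes 0 with
  | none => "F"   -- unreachable under Pre_check (Python raises IndexError on [])
  | some root =>
    if root = "#" then "F"
    else
      let r := checkLoop (codes.drop 1) 2
      if r.2 = 0 ∧ r.1 = [] then "T" else "F"

-- ===== PORT B =====
-- B's inner while loop: while the top three of the stack (head = top) are '#','#',non-'#',
-- replace them by '#'.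
def collapse (st : List String) : List String :=
  match st with
  | a :: b :: c :: rest =>
    if a = "#" ∧ b = "#" ∧ c ≠ "#" then collapse ("#" :: rest) else a :: b :: c :: rest
  | st => st
termination_by st.length
decreasing_by simp

def check_alt (codes : List String) : String :=
  match PySem.List.pyGet? codes 0 with
  | none => "F"   -- unreachable under Pre_check (Python raises IndexError on [])
  | some root =>
    if root = "#" then "F"
    else if codes.foldl (fun st t => collapse (t :: st)) [] = ["#"] then "T" else "F"

-- ===== PRECONDITION & SPEC =====
-- Pre_ excludes only the empty list, on which Python A (codes[0]) raises IndexError.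
def Pre_check (codes : List String) : Prop := codes ≠ []
instance (codes : List String) : Decidable (Pre_check codes) := by unfold Pre_check; infer_instance
def pvWitness_check : List String := ["a", "#", "#"]

def Spec_check (codes : List String) (out : String) : Prop := out = check_alt codes
instance (codes : List String) (out : String) : Decidable (Spec_check codes out) := by unfold Spec_check; infer_instance

-- ===== CLAIM (what is proved, stated in full; the proofs are below) =====
def Claim_equal_check : Prop := ∀ (codes : List String), Dom_check codes → Pre_check codes → Spec_check codes (check codes)

-- ===== LEMMAS AND PROOFS =====

-- token weight: a node opens two slots net, '#' closes one
def wt (t : String) : Int := if t = "#" then -1 else 1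

def sumw (l : List String) : Int := (l.map wt).sum

-- a stack is Good while the root subtree is still open: nonempty, no two adjacent '#',
-- bottom (last) element not '#'
def Good (s : List String) : Prop :=
  s ≠ [] ∧ List.IsChain (fun a b => ¬(a = "#" ∧ b = "#")) s ∧ s.getLast? ≠ some "#"

theorem sumw_nil : sumw [] = 0 := rfl

theorem sumw_cons (a : String) (l : List String) : sumw (a :: l) = wt a + sumw l := by
  simp [sumw]

theorem collapse_sumw (st : List String) : sumw (collapse st) = sumw st := by
  fun_induction collapse with
  | case1 a b c rest h ih =>
    obtain ⟨ha, hb, hc⟩ := h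
    simp [sumw, wt, ha, hb, hc] at ih ⊢
    omega
  | case2 => rfl
  | case3 st h => rfl

theorem collapse_short (st : List String) (h : st.length ≤ 2) : collapse st = st := by
  cases st with
  | nil => rw [collapse]; intro a b c rest h'; simp at h'
  | cons a s1 =>
    cases s1 with
    | nil => rw [collapse]; intro a' b c rest h'; simp at h'
    | cons b s2 =>
      cases s2 with
      | nil => rw [collapse]; intro a' b' c rest h'; simp at h'
      | cons c s3 => simp at h

theorem collapse_nonhash (a : String) (s : List String) (ha : a ≠ "#") :
    collapse (a :: s) = a :: s := by
  cases s with
  | nil => exact collapse_short [a] (by simp)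
  | cons b s1 =>
    cases s1 with
    | nil => exact collapse_short [a, b] (by simp)
    | cons c rest =>
      rw [collapse]
      simp [ha]

theorem good_tail (a : String) (s : List String) (hs : s ≠ []) (hg : Good (a :: s)) :
    Good s := by
  cases s with
  | nil => exact absurd rfl hs
  | cons x s'' =>
    refine ⟨by simp, (List.isChain_cons_cons.mp hg.2.1).2, ?_⟩
    have := hg.2.2
    rw [List.getLast?_cons_cons] at this
    exact this

theorem good_hash_head (a x : String) (s'' : List String)
    (hg : Good (a :: x :: s'')) (ha : a = "#") : x ≠ "#" := by
  have := (List.isChain_cons_cons.mp hg.2.1).1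
  tauto

-- lower bound on the open-slot count of a Good stack
theorem good_sumw_lb_aux (n : Nat) :
    ∀ s : List String, s.length ≤ n → Good s →
      0 ≤ sumw s ∧ (s.head? ≠ some "#" → 1 ≤ sumw s) := by
  induction n with
  | zero =>
    intro s hlen hg
    exact absurd (List.length_eq_zero_iff.mp (by omega)) hg.1
  | succ n ih =>
    intro s hlen hg
    cases s with
    | nil => exact absurd rfl hg.1
    | cons a s1 =>
      cases s1 with
      | nil =>
        have ha : a ≠ "#" := by simpa using hg.2.2
        have hwa : wt a = 1 := by simp [wt, ha]
        have hv : sumw [a] = wt a := by rw [sumw_cons, sumw_nil]; ring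
        exact ⟨by omega, fun _ => by omega⟩
      | cons x s'' =>
        have hgt : Good (x :: s'') := good_tail a (x :: s'') (by simp) hg
        have hIH := ih (x :: s'') (by simp at hlen ⊢; omega) hgt
        have hws : sumw (a :: x :: s'') = wt a + sumw (x :: s'') := sumw_cons a _
        by_cases ha : a = "#"
        · have hx : x ≠ "#" := good_hash_head a x s'' hg ha
          have h1 : 1 ≤ sumw (x :: s'') := hIH.2 (by simp [hx])
          have hwa : wt a = -1 := by simp [wt, ha]
          refine ⟨by omega, fun hh => absurd ?_ hh⟩
          simp [ha]
        · have hwa : wt a = 1 := by simp [wt, ha]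
          have h0 := hIH.1
          exact ⟨by omega, fun _ => by omega⟩

theorem good_sumw_lb (s : List String) (hg : Good s) :
    0 ≤ sumw s ∧ (s.head? ≠ some "#" → 1 ≤ sumw s) :=
  good_sumw_lb_aux s.length s le_rfl hg

-- pushing '#' onto a Good stack with no open slots collapses it to ["#"]
theorem collapse_hash_zero_aux (n : Nat) :
    ∀ s : List String, s.length ≤ n → Good s → sumw s = 0 →
      collapse ("#" :: s) = ["#"] := by
  induction n with
  | zero =>
    intro s hlen hg _
    exact absurd (List.length_eq_zero_iff.mp (by omega)) hg.1
  | succ n ih =>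
    intro s hlen hg h0
    cases s with
    | nil => exact absurd rfl hg.1
    | cons a s1 =>
      by_cases ha : a = "#"
      · subst ha
        cases s1 with
        | nil => exact absurd (by simp) hg.2.2
        | cons x s'' =>
          have hx : x ≠ "#" := good_hash_head _ x s'' hg rfl
          have hcol : collapse ("#" :: "#" :: x :: s'') = collapse ("#" :: s'') := by
            rw [collapse]
            simp [hx]
          rw [hcol]
          have hwx : wt x = 1 := by simp [wt, hx]
          have hwh : wt "#" = -1 := by simp [wt]
          rw [sumw_cons, sumw_cons] at h0
          cases s'' with
          | nil => exact collapse_short ["#"] (by simp)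
          | cons y s₃ =>
            have hg3 : Good (y :: s₃) :=
              good_tail x (y :: s₃) (by simp)
                (good_tail "#" (x :: y :: s₃) (by simp) hg)
            exact ih (y :: s₃) (by simp at hlen ⊢; omega) hg3 (by omega)
      · exfalso
        have := (good_sumw_lb (a :: s1) hg).2 (by simp [ha])
        omega

theorem collapse_hash_zero (s : List String) (hg : Good s) (h0 : sumw s = 0) :
    collapse ("#" :: s) = ["#"] :=
  collapse_hash_zero_aux s.length s le_rfl hg h0

-- pushing '#' onto a Good stack with open slots keeps it Good
theorem collapse_hash_pos_aux (n : Nat) :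
    ∀ s : List String, s.length ≤ n → Good s → 1 ≤ sumw s →
      Good (collapse ("#" :: s)) := by
  induction n with
  | zero =>
    intro s hlen hg _
    exact absurd (List.length_eq_zero_iff.mp (by omega)) hg.1
  | succ n ih =>
    intro s hlen hg h1
    cases s with
    | nil => exact absurd rfl hg.1
    | cons a s1 =>
      by_cases ha : a = "#"
      · subst ha
        cases s1 with
        | nil => exact absurd (by simp) hg.2.2
        | cons x s'' =>
          have hx : x ≠ "#" := good_hash_head _ x s'' hg rfl
          have hcol : collapse ("#" :: "#" :: x :: s'') = collapse ("#" :: s'') := by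
            rw [collapse]
            simp [hx]
          rw [hcol]
          have hwx : wt x = 1 := by simp [wt, hx]
          have hwh : wt "#" = -1 := by simp [wt]
          rw [sumw_cons, sumw_cons] at h1
          cases s'' with
          | nil => exfalso; rw [sumw_nil] at h1; omega
          | cons y s₃ =>
            have hg3 : Good (y :: s₃) :=
              good_tail x (y :: s₃) (by simp)
                (good_tail "#" (x :: y :: s₃) (by simp) hg)
            exact ih (y :: s₃) (by simp at hlen ⊢; omega) hg3 (by omega)
      · have hcol : collapse ("#" :: a :: s1) = "#" :: a :: s1 := by
          cases s1 with
          | nil => exact collapse_short ["#", a] (by simp)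
          | cons b s2 =>
            rw [collapse]
            simp [ha]
        rw [hcol]
        refine ⟨by simp, List.isChain_cons_cons.mpr ⟨by tauto, hg.2.1⟩, ?_⟩
        rw [List.getLast?_cons_cons]
        exact hg.2.2

theorem collapse_hash_pos (s : List String) (hg : Good s) (h1 : 1 ≤ sumw s) :
    Good (collapse ("#" :: s)) :=
  collapse_hash_pos_aux s.length s le_rfl hg h1

-- once the bottom of the stack is '#' and the stack has ≥ 2 entries, that persists
theorem collapse_phase2 (z : List String) (hl : 2 ≤ z.length) (hz : z.getLast? = some "#") :
    2 ≤ (collapse z).length ∧ (collapse z).getLast? = some "#" := by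
  fun_induction collapse with
  | case1 a b c rest h ih =>
    obtain ⟨ha, hb, hc⟩ := h
    match rest with
    | [] =>
      exfalso
      simp [List.getLast?] at hz
      exact hc hz
    | r :: rest' =>
      apply ih
      · simp
      · rw [List.getLast?_cons_cons, List.getLast?_cons_cons] at hz
        rw [List.getLast?_cons_cons]
        exact hz
  | case2 a b c rest h => exact ⟨by simp, hz⟩
  | case3 st h => exact ⟨hl, hz⟩

theorem phase2 (t s : List String) (hl : 2 ≤ s.length) (hz : s.getLast? = some "#") :
    2 ≤ (t.foldl (fun st t => collapse (t :: st)) s).length ∧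
      (t.foldl (fun st t => collapse (t :: st)) s).getLast? = some "#" := by
  induction t generalizing s with
  | nil => exact ⟨hl, hz⟩
  | cons a t' ih =>
    simp only [List.foldl_cons]
    cases s with
    | nil => simp at hl
    | cons b s' =>
      obtain ⟨h1, h2'⟩ := collapse_phase2 (a :: b :: s') (by simp)
        (by rw [List.getLast?_cons_cons]; exact hz)
      exact ih _ h1 h2'

theorem checkLoop_zero (l : List String) : checkLoop l 0 = (l, 0) := by
  match l with
  | [] => rfl
  | c :: rest => rw [checkLoop]; simp

-- the central simulation: A's counter loop reaches ([], 0) exactly when B's fold reduces to ["#"]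
theorem main_lemma (t : List String) (s : List String) (m : Nat)
    (hg : Good s) (hs : sumw s = (m : Int)) :
    (checkLoop t ((m : Int) + 1) = ([], 0)) ↔
      (t.foldl (fun st t => collapse (t :: st)) s = ["#"]) := by
  induction t generalizing s m with
  | nil =>
    simp only [checkLoop, List.foldl_nil]
    constructor
    · intro h
      exfalso
      have : (m : Int) + 1 = 0 := congrArg Prod.snd h
      omega
    · intro h
      exfalso
      rw [h, sumw_cons, sumw_nil] at hs
      have : wt "#" = -1 := by simp [wt]
      omega
  | cons a t' ih =>
    rw [checkLoop]
    rw [if_pos (by omega : (0:Int) < (m : Int) + 1)]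
    simp only [List.foldl_cons]
    by_cases ha : a = "#"
    · subst ha
      rw [if_pos rfl]
      match m with
      | 0 =>
        rw [(by omega : ((0:Nat) : Int) + 1 - 1 = 0), checkLoop_zero]
        rw [collapse_hash_zero s hg (by omega)]
        constructor
        · intro h
          have ht' : t' = [] := congrArg Prod.fst h
          subst ht'
          rfl
        · intro h
          match t' with
          | [] => rfl
          | b :: t'' =>
            exfalso
            simp only [List.foldl_cons] at h
            rw [collapse_short [b, "#"] (by simp)] at h
            have := phase2 t'' [b, "#"] (by simp) (by rfl)
            rw [h] at this
            simp at this
      | m' + 1 =>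
        rw [(by push_cast; ring : ((m' + 1 : Nat) : Int) + 1 - 1 = ((m' : Nat) : Int) + 1)]
        have hg2 : Good (collapse ("#" :: s)) := collapse_hash_pos s hg (by omega)
        have hs2 : sumw (collapse ("#" :: s)) = (m' : Int) := by
          rw [collapse_sumw, sumw_cons]
          have : wt "#" = -1 := by simp [wt]
          omega
        exact ih (collapse ("#" :: s)) m' hg2 hs2
    · rw [if_neg ha]
      rw [collapse_nonhash a s ha]
      have hg2 : Good (a :: s) := by
        obtain ⟨hne, hch, hlast⟩ := hg
        cases s with
        | nil => exact absurd rfl hne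
        | cons b s' =>
          exact ⟨by simp, List.isChain_cons_cons.mpr ⟨by tauto, hch⟩,
            by rw [List.getLast?_cons_cons]; exact hlast⟩
      have hs2 : sumw (a :: s) = ((m + 1 : Nat) : Int) := by
        rw [sumw_cons]
        have : wt a = 1 := by simp [wt, ha]
        push_cast
        omega
      rw [(by push_cast; ring : ((m : Nat) : Int) + 1 + 1 = ((m + 1 : Nat) : Int) + 1)]
      exact ih (a :: s) (m + 1) hg2 hs2

-- ===== VERDICT (by name: the statement is the Claim_ definition above) =====
theorem check_spec : Claim_equal_check := by
  intro codes _ hpre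
  unfold Spec_check check check_alt
  match codes with
  | [] => exact absurd rfl hpre
  | root :: t =>
    rw [PySem.List.pyGet?_zero_cons]
    by_cases hr : root = "#"
    · simp [hr]
    · simp only [if_neg hr, List.drop_one, List.tail_cons, List.foldl_cons]
      simp only [collapse_nonhash root [] hr]
      have hmain := main_lemma t [root] 1
        ⟨by simp, List.IsChain.singleton root, by simp [hr]⟩
        (by rw [sumw_cons, sumw_nil]; simp [wt, hr])
      norm_num at hmain
      by_cases hA : checkLoop t 2 = ([], 0)
      · rw [if_pos (by rw [hA]; exact ⟨rfl, rfl⟩), if_pos (hmain.mp hA)]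
      · have hc : ¬((checkLoop t 2).2 = 0 ∧ (checkLoop t 2).1 = []) :=
          fun ⟨h1, h2⟩ => hA (Prod.ext h2 h1)
        rw [if_neg hc, if_neg (fun h => hA (hmain.mpr h))]
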